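-- pv_equiv track=rewrite | github.com/the-bird-is-the-word/metamon-manager | mm/metamon_island.py | picker_battler_weakest
-- ===== SOURCE A (Python) =====
-- def get_battler_score(monster):
--     """ Get opponent's power score"""
--     return monster["sca"]
--
-- def picker_battler_weakest(battlers):
--     battler = battlers[0]
--     score_min = get_battler_score(battler)
--     for i in range(1, len(battlers)):
--         score = get_battler_score(battlers[i])
--         if score < score_min:
--             battler = battlers[i]
--             score_min = score
--     return battler
-- ===== SOURCE B (Python) =====
-- def get_battler_score(monster):
--     """ Get opponent's power score"""
--     return monster["sca"]
--
-- def picker_battler_weakest(battlers):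
--     # stable sort by score: the first element of the sorted copy is the
--     # first-occurring battler with the minimal score, exactly A's answer
--     return sorted(battlers, key=get_battler_score)[0]
-- ===== Notes on version B (the rewrite author's own statement) =====
-- stated objective: alternative
-- what changed: B replaces A's index-driven running-minimum loop by a stable sort on the score followed by taking the first element; stability makes ties resolve to the same first-occurring battler as A's strict < comparison.
-- outside the precondition, e.g. on picker_battler_weakest([]): A raises IndexError, B raises IndexError; on picker_battler_weakest([{'foo': 1}]): A raises KeyError, B raises KeyError
import Mathlib
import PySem

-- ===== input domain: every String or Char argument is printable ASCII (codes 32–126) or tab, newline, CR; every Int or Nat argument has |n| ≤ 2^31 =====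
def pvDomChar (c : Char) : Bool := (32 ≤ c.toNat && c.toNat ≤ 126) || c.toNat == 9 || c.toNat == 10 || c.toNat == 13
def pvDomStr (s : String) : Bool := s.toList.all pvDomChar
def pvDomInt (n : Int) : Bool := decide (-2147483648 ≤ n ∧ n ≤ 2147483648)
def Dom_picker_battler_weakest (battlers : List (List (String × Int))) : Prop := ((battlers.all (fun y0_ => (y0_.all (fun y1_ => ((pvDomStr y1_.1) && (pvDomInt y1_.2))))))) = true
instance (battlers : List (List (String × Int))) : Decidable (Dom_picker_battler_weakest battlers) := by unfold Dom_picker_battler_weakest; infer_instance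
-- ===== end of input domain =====

-- B replaces A's index-driven running-minimum loop by a stable sort on the score
-- followed by taking the first element (objective: alternative decomposition).
-- Return-value equivalence only; neither version mutates its argument.

-- ===== PORT A =====
-- monster["sca"]: exact under Pre_ (every battler contains key "sca"; Python raises KeyError otherwise)
def get_battler_score (monster : List (String × Int)) : Int :=
  PySem.Dict.getD (PySem.Dict.mk monster) "sca" 0

def picker_battler_weakest (battlers : List (List (String × Int))) : List (String × Int) :=
  -- battlers[0]: exact under Pre_ (battlers ≠ []; Python raises IndexError on [])
  let battler := PySem.List.pyGetD battlers 0 []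
  let score_min := get_battler_score battler
  ((PySem.List.pyRange 1 (PySem.List.len battlers)).foldl
    (fun (st : List (String × Int) × Int) i =>
      let score := get_battler_score (PySem.List.pyGetD battlers i [])
      if score < st.2 then (PySem.List.pyGetD battlers i [], score) else st)
    (battler, score_min)).1

-- ===== PORT B =====
def picker_battler_weakest_alt (battlers : List (List (String × Int))) : List (String × Int) :=
  -- sorted(battlers, key=get_battler_score)[0]; [0] exact under Pre_ (battlers ≠ [])
  PySem.List.pyGetD (PySem.List.sorted battlers get_battler_score) 0 []

-- ===== PRECONDITION & SPEC =====
-- Pre_ excludes exactly the inputs where A raises: IndexError on [], KeyError when a battler lacks key "sca".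
def Pre_picker_battler_weakest (battlers : List (List (String × Int))) : Prop :=
  battlers ≠ [] ∧ ∀ b ∈ battlers, PySem.Dict.contains (PySem.Dict.mk b) "sca" = true

instance (battlers : List (List (String × Int))) : Decidable (Pre_picker_battler_weakest battlers) := by
  unfold Pre_picker_battler_weakest; infer_instance

def pvWitness_picker_battler_weakest : (List (List (String × Int))) :=
  [[("sca", 3)], [("sca", 1)], [("sca", 1)]]

def Spec_picker_battler_weakest (battlers : List (List (String × Int))) (out : List (String × Int)) : Prop := out = picker_battler_weakest_alt battlers
instance (battlers : List (List (String × Int))) (out : List (String × Int)) : Decidable (Spec_picker_battler_weakest battlers out) := by unfold Spec_picker_battler_weakest; infer_instance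

-- ===== CLAIM (what is proved, stated in full; the proofs are below) =====
def Claim_equal_picker_battler_weakest : Prop := ∀ (battlers : List (List (String × Int))), Dom_picker_battler_weakest battlers → Pre_picker_battler_weakest battlers → Spec_picker_battler_weakest battlers (picker_battler_weakest battlers)

-- ===== LEMMAS AND PROOFS =====

-- head of the insertion-sort accumulator evolves exactly like A's running minimum:
-- inserting x into m :: rest puts x in front iff key x < key m (stability: ties stay behind m).
theorem pv_fold_head {α : Type} (key : α → Int) :
    ∀ (t : List α) (m : α) (rest : List α),
      (t.foldl (fun acc x => PySem.List.insertBy (fun a b => decide (key a < key b)) x acc) (m :: rest)).head?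
        = some ((t.foldl (fun (st : α × Int) x => if key x < st.2 then (x, key x) else st) (m, key m)).1) := by
  intro t
  induction t with
  | nil => intro m rest; simp
  | cons x t ih =>
    intro m rest
    simp only [List.foldl_cons, PySem.List.insertBy]
    by_cases h : key x < key m
    · simp only [h, decide_true, if_true]
      exact ih x (m :: rest)
    · simp only [h, decide_false, if_false]
      exact ih m (PySem.List.insertBy (fun a b => decide (key a < key b)) x rest)

-- ===== VERDICT (by name: the statement is the Claim_ definition above) =====
theorem picker_battler_weakest_spec : Claim_equal_picker_battler_weakest := by
  intro battlers _ hpre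
  obtain ⟨hne, -⟩ := hpre
  obtain ⟨b0, t, rfl⟩ : ∃ b0 t, battlers = b0 :: t := by
    cases battlers with
    | nil => exact absurd rfl hne
    | cons a l => exact ⟨a, l, rfl⟩
  unfold Spec_picker_battler_weakest picker_battler_weakest picker_battler_weakest_alt
  simp only []
  rw [PySem.List.foldl_pyRange_pyGetD (b0 :: t) []
      (fun (st : List (String × Int) × Int) b =>
        if get_battler_score b < st.2 then (b, get_battler_score b) else st)
      _ (by norm_num)]
  rw [PySem.List.sorted_eq_foldl_insertBy]
  simp only [List.foldl_cons, PySem.List.insertBy, Int.toNat_one, List.drop_succ_cons,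
    List.drop_zero]
  have h := pv_fold_head get_battler_score t b0 []
  have hg : PySem.List.pyGetD (b0 :: t) 0 [] = b0 := by
    simp [PySem.List.pyGetD]
  rw [hg]
  cases he : (t.foldl (fun acc x =>
      PySem.List.insertBy (fun a b => decide (get_battler_score a < get_battler_score b)) x acc)
      [b0]) with
  | nil => rw [he] at h; simp at h
  | cons r rs =>
    rw [he] at h
    simp only [List.head?_cons, Option.some.injEq] at h
    have : PySem.List.pyGetD (r :: rs) 0 [] = r := by
      simp [PySem.List.pyGetD]
    rw [this, ← h]
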